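-- pv_equiv track=rewrite | github.com/jinyoong/programers | level2/124 나라의 숫자.py | solution
-- ===== SOURCE A (Python) =====
-- def solution(n):
--     answer = ''
--     x = n
--
--     while x > 2:
--         x, y = divmod(x, 3)
--         if y == 0:
--             x = x - 1
--             answer += str(4)
--         else:
--             answer += str(y)
--     if x != 0:
--         answer += str(x)
--
--     return answer[::-1]
-- ===== SOURCE B (Python) =====
-- def solution(n):
--     if n <= 0:
--         return ''
--     # numbers with exactly L digits form a block of size 3**L starting at (3**L - 1) // 2
--     start, block, L = 1, 3, 1
--     while n >= start + block:
--         start += block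
--         block *= 3
--         L += 1
--     # write the zero-based offset within the block in ordinary base 3, alphabet '124'
--     m = n - start
--     digits = []
--     for _ in range(L):
--         digits.append('124'[m % 3])
--         m //= 3
--     return ''.join(reversed(digits))
-- ===== Notes on version B (the rewrite author's own statement) =====
-- stated objective: alternative
-- what changed: B first determines the digit count L by summing geometric block sizes (the length-L numbers form a block of 3^L values), then writes the zero-based offset within that block in ordinary base 3 over the alphabet '124', replacing A's bijective digit-extraction loop (divmod with borrow, trailing append, reverse); Pre_ keeps the task's natural domain n >= 0.
-- outside the precondition, e.g. on solution(-5): A returns '5-', B returns ''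
import Mathlib
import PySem

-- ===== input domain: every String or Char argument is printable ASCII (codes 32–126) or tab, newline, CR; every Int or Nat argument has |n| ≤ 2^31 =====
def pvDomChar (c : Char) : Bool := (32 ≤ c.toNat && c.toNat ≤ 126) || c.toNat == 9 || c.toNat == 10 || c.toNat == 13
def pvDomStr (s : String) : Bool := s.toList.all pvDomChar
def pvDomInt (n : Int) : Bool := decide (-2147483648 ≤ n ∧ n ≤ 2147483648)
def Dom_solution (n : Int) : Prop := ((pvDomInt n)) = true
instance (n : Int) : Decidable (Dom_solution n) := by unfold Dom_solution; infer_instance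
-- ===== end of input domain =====

-- B determines the digit count L by walking the geometric blocks (the length-L numbers
-- form a block of 3^L values starting at (3^L-1)/2) and then writes the zero-based offset
-- within that block in ordinary base 3 over the alphabet '124'; A extracts digits with a
-- divmod/borrow loop and reverses. Alternative algorithm, same cost.

-- ===== PORT A =====
-- the while-loop: state (x, answer); answer kept as List Char
def solutionLoopA (x : Int) (answer : List Char) : Int × List Char :=
  if _h : 2 < x then
    let q := PySem.Int.floordiv x 3
    let y := PySem.Int.mod x 3
    if y = 0 then
      solutionLoopA (q - 1) (answer ++ PySem.Int.toChars 4)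
    else
      solutionLoopA q (answer ++ PySem.Int.toChars y)
  else (x, answer)
termination_by x.toNat
decreasing_by
  · have := PySem.Int.floordiv_eq_ediv_of_pos (a := x) (b := 3) (by omega)
    simp only [this]; omega
  · have := PySem.Int.floordiv_eq_ediv_of_pos (a := x) (b := 3) (by omega)
    simp only [this]; omega

def solution (n : Int) : String :=
  let r := solutionLoopA n []
  let answer := if r.1 ≠ 0 then r.2 ++ PySem.Int.toChars r.1 else r.2
  -- answer[::-1] is List.reverse
  String.ofList answer.reverse

-- ===== PORT B =====
-- Source B's length loop: while n >= start + block: start += block; block *= 3; L += 1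
-- (the '0 < block' conjunct is only a totality guard: block is always a positive power of 3)
def lenLoopB (n start block L : Nat) : Nat × Nat :=
  if h : start + block ≤ n ∧ 0 < block then
    lenLoopB n (start + block) (block * 3) (L + 1)
  else (start, L)
termination_by n - start
decreasing_by omega

-- Source B's digit loop: for _ in range(L): digits.append('124'[m % 3]); m //= 3
def digitLoopB : Nat → Nat → List Char → List Char
  | 0, _, acc => acc
  | L + 1, m, acc => digitLoopB L (m / 3) (acc ++ ["124".toList.getD (m % 3) ' '])

def solution_alt (n : Int) : String :=
  if n ≤ 0 then "" else
    let p := lenLoopB n.toNat 1 3 1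
    -- ''.join(reversed(digits))
    String.ofList (digitLoopB p.2 (n.toNat - p.1) []).reverse

-- ===== PRECONDITION & SPEC =====
-- Pre_ restricts to the task's natural domain n ≥ 0 (the 124-country numbering is defined
-- for nonnegative n); on negative n A returns str(n) reversed, e.g. '5-', and B returns ''.
def Pre_solution (n : Int) : Prop := 0 ≤ n
instance (n : Int) : Decidable (Pre_solution n) := by unfold Pre_solution; infer_instance
def pvWitness_solution : Int := 5

def Spec_solution (n : Int) (out : String) : Prop := out = solution_alt n
instance (n : Int) (out : String) : Decidable (Spec_solution n out) := by unfold Spec_solution; infer_instance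

-- ===== CLAIM (what is proved, stated in full; the proofs are below) =====
def Claim_equal_solution : Prop := ∀ (n : Int), Dom_solution n → Pre_solution n → Spec_solution n (solution n)

-- ===== LEMMAS AND PROOFS =====

-- proof-only helper: the bijective-base-3 characterisation both programs are reduced to
def bijLoop (n : Int) (answer : List Char) : List Char :=
  if h : 0 < n then
    bijLoop (PySem.Int.floordiv (n - 1) 3)
      (((PySem.Chars.pyGet? "412".toList (PySem.Int.mod n 3)).getD ' ') :: answer)
  else answer
termination_by n.toNat
decreasing_by
  have := PySem.Int.floordiv_eq_ediv_of_pos (a := n - 1) (b := 3) (by omega)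
  simp only [this]; omega

lemma loopA_base (x : Int) (acc : List Char) (h : ¬ 2 < x) :
    solutionLoopA x acc = (x, acc) := by
  rw [solutionLoopA, dif_neg h]

lemma bij_base (n : Int) (acc : List Char) (h : ¬ 0 < n) :
    bijLoop n acc = acc := by
  rw [bijLoop, dif_neg h]

-- accumulator lemma for A's loop
lemma loopA_acc : ∀ (k : Nat) (x : Int), x.toNat ≤ k → ∀ (acc : List Char),
    solutionLoopA x acc = ((solutionLoopA x []).1, acc ++ (solutionLoopA x []).2) := by
  intro k
  induction k with
  | zero =>
      intro x hx acc
      rw [solutionLoopA, solutionLoopA]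
      rw [dif_neg (by omega), dif_neg (by omega)]
      simp
  | succ k ih =>
      intro x hx acc
      by_cases h : 2 < x
      · have hq : PySem.Int.floordiv x 3 = x / 3 :=
          PySem.Int.floordiv_eq_ediv_of_pos (by omega)
        rw [solutionLoopA]
        conv_rhs => rw [solutionLoopA]
        rw [dif_pos h, dif_pos h]
        by_cases hy : PySem.Int.mod x 3 = 0
        · rw [if_pos hy, if_pos hy]
          rw [ih _ (by simp only [hq]; omega) (acc ++ PySem.Int.toChars 4),
              ih _ (by simp only [hq]; omega) ([] ++ PySem.Int.toChars 4)]
          simp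
        · rw [if_neg hy, if_neg hy]
          rw [ih _ (by simp only [hq]; omega) (acc ++ PySem.Int.toChars (PySem.Int.mod x 3)),
              ih _ (by simp only [hq]; omega) ([] ++ PySem.Int.toChars (PySem.Int.mod x 3))]
          simp
      · rw [solutionLoopA]
        conv_rhs => rw [solutionLoopA]
        rw [dif_neg h, dif_neg h]
        simp

-- accumulator lemma for the bijective loop
lemma bij_acc : ∀ (k : Nat) (n : Int), n.toNat ≤ k → ∀ (acc : List Char),
    bijLoop n acc = bijLoop n [] ++ acc := by
  intro k
  induction k with
  | zero =>
      intro n hn acc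
      rw [bijLoop]
      conv_rhs => rw [bijLoop]
      rw [dif_neg (by omega), dif_neg (by omega)]
      simp
  | succ k ih =>
      intro n hn acc
      by_cases h : 0 < n
      · have hq : PySem.Int.floordiv (n - 1) 3 = (n - 1) / 3 :=
          PySem.Int.floordiv_eq_ediv_of_pos (by omega)
        rw [bijLoop]
        conv_rhs => rw [bijLoop]
        rw [dif_pos h, dif_pos h]
        have hle : (PySem.Int.floordiv (n - 1) 3).toNat ≤ k := by simp only [hq]; omega
        conv_lhs => rw [ih _ hle]
        conv_rhs => rw [ih _ hle]
        simp
      · rw [bijLoop]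
        conv_rhs => rw [bijLoop]
        rw [dif_neg h, dif_neg h]
        simp

-- reverse of the tail-if after one loop step peels the first accumulated char
lemma reverse_if_step (r1 : Int) (s : List Char) (c : Char) :
    (if r1 ≠ 0 then c :: (s ++ PySem.Int.toChars r1) else c :: s).reverse
      = (if r1 ≠ 0 then s ++ PySem.Int.toChars r1 else s).reverse ++ [c] := by
  by_cases h : r1 ≠ 0 <;> simp [h]

-- A's reversed output is the bijective loop
lemma main_lemma : ∀ (k : Nat) (x : Int), 0 ≤ x → x.toNat ≤ k →
    ((if (solutionLoopA x []).1 ≠ 0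
      then (solutionLoopA x []).2 ++ PySem.Int.toChars (solutionLoopA x []).1
      else (solutionLoopA x []).2).reverse) = bijLoop x [] := by
  intro k
  induction k with
  | zero =>
      intro x hx0 hx
      have : x = 0 := by omega
      subst this
      rw [loopA_base _ _ (by decide), bij_base _ _ (by decide)]
      decide
  | succ k ih =>
      intro x hx0 hx
      by_cases h : 2 < x
      · have hq : PySem.Int.floordiv x 3 = x / 3 :=
          PySem.Int.floordiv_eq_ediv_of_pos (by omega)
        have hq' : PySem.Int.floordiv (x - 1) 3 = (x - 1) / 3 :=
          PySem.Int.floordiv_eq_ediv_of_pos (by omega)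
        have hm : PySem.Int.mod x 3 = x % 3 :=
          PySem.Int.mod_eq_emod_of_pos (by omega)
        rw [bijLoop, dif_pos (by omega : (0:Int) < x)]
        rw [bij_acc k _ (by simp only [hq']; omega)]
        rw [solutionLoopA, dif_pos h]
        dsimp only
        have h3 : x % 3 = 0 ∨ x % 3 = 1 ∨ x % 3 = 2 := by omega
        rcases h3 with h3 | h3 | h3
        · rw [hm, h3]
          rw [if_pos rfl]
          rw [loopA_acc k _ (by simp only [hq]; omega) ([] ++ PySem.Int.toChars 4)]
          have hx' : PySem.Int.floordiv x 3 - 1 = PySem.Int.floordiv (x - 1) 3 := by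
            rw [hq, hq']; omega
          rw [hx']
          have hdig : ([] ++ PySem.Int.toChars 4 : List Char) = ['4'] := by decide
          rw [hdig]
          have hc : (PySem.Chars.pyGet? "412".toList (0 : Int)).getD ' ' = '4' := by decide
          rw [hc]
          simp only [List.cons_append, List.nil_append]
          rw [reverse_if_step]
          rw [ih _ (by rw [hq']; omega) (by rw [hq']; omega)]
        · rw [hm, h3]
          rw [if_neg (by decide : ¬((1:Int) = 0))]
          rw [loopA_acc k _ (by simp only [hq]; omega) ([] ++ PySem.Int.toChars 1)]
          have hx' : PySem.Int.floordiv x 3 = PySem.Int.floordiv (x - 1) 3 := by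
            rw [hq, hq']; omega
          rw [hx']
          have hdig : ([] ++ PySem.Int.toChars 1 : List Char) = ['1'] := by decide
          rw [hdig]
          have hc : (PySem.Chars.pyGet? "412".toList (1 : Int)).getD ' ' = '1' := by decide
          rw [hc]
          simp only [List.cons_append, List.nil_append]
          rw [reverse_if_step]
          rw [ih _ (by rw [hq']; omega) (by rw [hq']; omega)]
        · rw [hm, h3]
          rw [if_neg (by decide : ¬((2:Int) = 0))]
          rw [loopA_acc k _ (by simp only [hq]; omega) ([] ++ PySem.Int.toChars 2)]
          have hx' : PySem.Int.floordiv x 3 = PySem.Int.floordiv (x - 1) 3 := by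
            rw [hq, hq']; omega
          rw [hx']
          have hdig : ([] ++ PySem.Int.toChars 2 : List Char) = ['2'] := by decide
          rw [hdig]
          have hc : (PySem.Chars.pyGet? "412".toList (2 : Int)).getD ' ' = '2' := by decide
          rw [hc]
          simp only [List.cons_append, List.nil_append]
          rw [reverse_if_step]
          rw [ih _ (by rw [hq']; omega) (by rw [hq']; omega)]
      · have : x = 0 ∨ x = 1 ∨ x = 2 := by omega
        rcases this with rfl | rfl | rfl
        · rw [loopA_base _ _ (by decide), bij_base _ _ (by decide)]; decide
        · rw [loopA_base _ _ (by decide)]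
          rw [bijLoop, dif_pos (by decide)]
          rw [bij_base _ _ (by decide)]
          decide
        · rw [loopA_base _ _ (by decide)]
          rw [bijLoop, dif_pos (by decide)]
          rw [bij_base _ _ (by decide)]
          decide

-- ===== B-side lemmas =====

lemma lenB_stop (n s b L : Nat) (h : ¬ (s + b ≤ n ∧ 0 < b)) : lenLoopB n s b L = (s, L) := by
  rw [lenLoopB, dif_neg h]

lemma lenB_step (n s b L : Nat) (h : s + b ≤ n ∧ 0 < b) :
    lenLoopB n s b L = lenLoopB n (s + b) (b * 3) (L + 1) := by
  rw [lenLoopB, dif_pos h]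

lemma lenB_start_le : ∀ (k n s b L : Nat), n - s ≤ k → s ≤ n → (lenLoopB n s b L).1 ≤ n := by
  intro k
  induction k with
  | zero =>
      intro n s b L hk hs
      rw [lenB_stop _ _ _ _ (by omega)]
      exact hs
  | succ k ih =>
      intro n s b L hk hs
      by_cases hg : s + b ≤ n ∧ 0 < b
      · rw [lenB_step _ _ _ _ hg]
        exact ih n (s + b) (b * 3) (L + 1) (by omega) hg.1
      · rw [lenB_stop _ _ _ _ hg]; exact hs

-- the length loop commutes with the base map n ↦ 3n + r (1 ≤ r ≤ 3)
lemma lenB_shift : ∀ (k n' s b L r : Nat), n' - s ≤ k → 0 < b → 1 ≤ r → r ≤ 3 →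
    lenLoopB (3 * n' + r) (3 * s + 1) (3 * b) (L + 1)
      = (3 * (lenLoopB n' s b L).1 + 1, (lenLoopB n' s b L).2 + 1) := by
  intro k
  induction k with
  | zero =>
      intro n' s b L r hk hb hr1 hr3
      rw [lenB_stop _ _ _ _ (by omega), lenB_stop _ _ _ _ (by omega)]
  | succ k ih =>
      intro n' s b L r hk hb hr1 hr3
      by_cases hg : s + b ≤ n'
      · rw [lenB_step _ _ _ _ ⟨by omega, by omega⟩, lenB_step _ _ _ _ ⟨hg, hb⟩]
        have e1 : 3 * s + 1 + 3 * b = 3 * (s + b) + 1 := by ring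
        have e2 : 3 * b * 3 = 3 * (b * 3) := by ring
        rw [e1, e2]
        exact ih n' (s + b) (b * 3) (L + 1) r (by omega) (by omega) hr1 hr3
      · rw [lenB_stop _ _ _ _ (by omega), lenB_stop _ _ _ _ (by omega)]

lemma digit_acc : ∀ (L m : Nat) (acc : List Char),
    digitLoopB L m acc = acc ++ digitLoopB L m [] := by
  intro L
  induction L with
  | zero => intro m acc; simp [digitLoopB]
  | succ L ih =>
      intro m acc
      simp only [digitLoopB]
      rw [ih (m / 3) (acc ++ _), ih (m / 3) ([] ++ _)]
      simp

-- B's digit list (reversed) is the bijective loop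
lemma B_eq_bij : ∀ (k n : Nat), n ≤ k → 1 ≤ n →
    (digitLoopB (lenLoopB n 1 3 1).2 (n - (lenLoopB n 1 3 1).1) []).reverse
      = bijLoop (n : Int) [] := by
  intro k
  induction k with
  | zero => intro n hk h1; omega
  | succ k ih =>
      intro n hk h1
      by_cases h4 : n ≤ 3
      · interval_cases n
        · rw [lenB_stop _ _ _ _ (by omega)]
          rw [show ((1:Nat):Int) = 1 by norm_num]
          rw [bijLoop, dif_pos (by norm_num)]
          rw [bij_base _ _ (by decide)]
          decide
        · rw [lenB_stop _ _ _ _ (by omega)]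
          rw [show ((2:Nat):Int) = 2 by norm_num]
          rw [bijLoop, dif_pos (by norm_num)]
          rw [bij_base _ _ (by decide)]
          decide
        · rw [lenB_stop _ _ _ _ (by omega)]
          rw [show ((3:Nat):Int) = 3 by norm_num]
          rw [bijLoop, dif_pos (by norm_num)]
          rw [bij_base _ _ (by decide)]
          decide
      · set n' := (n - 1) / 3 with hn'def
        set r := n - 3 * n' with hrdef
        have hfacts : n = 3 * n' + r ∧ 1 ≤ r ∧ r ≤ 3 ∧ 1 ≤ n' := by omega
        -- unfold one step of the length loop, then shift
        rw [lenB_step _ _ _ _ ⟨by omega, by omega⟩]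
        rw [show (1 + 3 : Nat) = 3 * 1 + 1 by norm_num,
            show (3 * 3 : Nat) = 3 * 3 by norm_num,
            show (1 + 1 : Nat) = 1 + 1 by norm_num]
        rw [hfacts.1]
        rw [lenB_shift n' n' 1 3 1 r (by omega) (by omega) hfacts.2.1 hfacts.2.2.1]
        set s := (lenLoopB n' 1 3 1).1 with hsdef
        set L := (lenLoopB n' 1 3 1).2 with hLdef
        have hs : s ≤ n' := lenB_start_le n' n' 1 3 1 (by omega) (by omega)
        have hm : 3 * n' + r - (3 * s + 1) = 3 * (n' - s) + (r - 1) := by omega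
        rw [hm]
        simp only [digitLoopB]
        have hdiv : (3 * (n' - s) + (r - 1)) / 3 = n' - s := by omega
        have hmod : (3 * (n' - s) + (r - 1)) % 3 = r - 1 := by omega
        rw [hdiv, hmod]
        rw [digit_acc]
        have hih := ih n' (by omega) (by omega)
        -- right side: one step of the bijective loop
        rw [bijLoop, dif_pos (by omega : (0:Int) < ((3 * n' + r : Nat) : Int))]
        have hfd : PySem.Int.floordiv (((3 * n' + r : Nat) : Int) - 1) 3 = (n' : Int) := by
          rw [PySem.Int.floordiv_eq_ediv_of_pos (by omega)]; omega
        rw [hfd]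
        rw [bij_acc n' (n' : Int) (by omega) _]
        rw [← hih]
        have hmodI : PySem.Int.mod ((3 * n' + r : Nat) : Int) 3 = ((r % 3 : Nat) : Int) := by
          rw [PySem.Int.mod_eq_emod_of_pos (by omega)]; omega
        rw [hmodI]
        have hr3 : r = 1 ∨ r = 2 ∨ r = 3 := by omega
        rcases hr3 with hr | hr | hr <;> rw [hr] <;> simp <;> rfl

-- ===== VERDICT (by name: the statement is the Claim_ definition above) =====
theorem solution_spec : Claim_equal_solution := by
  intro n hdom hpre
  unfold Spec_solution solution solution_alt
  simp only []
  rw [main_lemma n.toNat n hpre (le_refl _)]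
  by_cases h0 : n ≤ 0
  · have hn0 : n = 0 := le_antisymm h0 hpre
    subst hn0
    rw [if_pos (le_refl _), bij_base _ _ (by decide)]
  · rw [if_neg h0]
    have hB := B_eq_bij n.toNat n.toNat (le_refl _) (by omega)
    rw [hB]
    have hcast : ((n.toNat : Nat) : Int) = n := by omega
    rw [hcast]
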